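-- pv_equiv track=rewrite | github.com/yeonnseok/ps-algorithm | 2019 baekjoon/BruteForce/16968_carNumber.py | go
-- ===== SOURCE A (Python) =====
-- def go(s, index, last):
--     if len(s) == index:
--         return 1
--
--     if s[index] == 'c':
--         start = ord('a')
--         end = ord('z')
--     else:
--         start = ord('0')
--         end = ord('9')
--
--     ans = 0
--     for i in range(start, end+1):
--         if i != last:
--             ans += go(s, index + 1, i)
--     return ans
-- ===== SOURCE B (Python) =====
-- def go(s, index, last):
--     # Closed-form product over positions: each position contributes its full
--     # alphabet size, minus 1 when the previous value can collide with it.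
--     ans = 1
--     for i in range(index, len(s)):
--         lo, hi = (ord('a'), ord('z')) if s[i] == 'c' else (ord('0'), ord('9'))
--         if i == index:
--             sub = 1 if lo <= last <= hi else 0
--         else:
--             sub = 1 if (s[i - 1] == 'c') == (s[i] == 'c') else 0
--         ans *= hi - lo + 1 - sub
--     return ans
-- ===== Notes on version B (the rewrite author's own statement) =====
-- stated objective: faster
-- what changed: Replaced A's exponential branch-and-count recursion (summing over every admissible character at every position) with a single linear pass computing the closed-form product: each position contributes its alphabet size (26 for 'c', 10 otherwise) minus 1 exactly when the previous value can collide with it; intended as faster (asymptotic: a timing run saw A time out already at n=16 while B returned instantly, so no ratio could be measured at the largest common size).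
import Mathlib
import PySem

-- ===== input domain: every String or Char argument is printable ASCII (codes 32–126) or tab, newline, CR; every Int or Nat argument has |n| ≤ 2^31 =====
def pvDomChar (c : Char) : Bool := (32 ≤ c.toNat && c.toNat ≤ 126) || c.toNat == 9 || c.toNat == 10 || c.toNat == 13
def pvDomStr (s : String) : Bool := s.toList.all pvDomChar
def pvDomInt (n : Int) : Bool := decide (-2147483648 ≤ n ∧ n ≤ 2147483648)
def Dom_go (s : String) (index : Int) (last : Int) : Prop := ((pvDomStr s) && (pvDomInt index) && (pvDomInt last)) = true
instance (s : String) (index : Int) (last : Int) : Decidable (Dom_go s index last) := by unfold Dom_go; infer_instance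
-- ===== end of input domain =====

-- B replaces A's exponential branch-and-count recursion with a linear closed-form product over positions (intended as faster; a timing run saw A time out at n=16 while B returned, so no ratio was measurable); the return value is proved equal on Pre_go.

-- lemma cited by the port's decreasing_by
theorem str_pyGet?_lt (s : String) (i : Int) (c : Char)
    (h : PySem.Str.pyGet? s i = some c) : i < (s.toList.length : Int) := by
  simp only [PySem.Str.pyGet?_eq, PySem.Chars.pyGet?_eq_listPyGet?] at h
  have hin : PySem.Raise.InRange s.toList.length i := by
    by_contra hc
    rw [← PySem.List.pyGet?_eq_none_iff] at hc
    simp [h] at hc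
  simp only [PySem.Raise.InRange] at hin
  omega

-- ===== PORT A =====
def go (s : String) (index : Int) (last : Int) : Int :=
  if PySem.Str.len s == index then 1
  else
    match h : PySem.Str.pyGet? s index with
    | none => 0   -- Python raises IndexError here; excluded by Pre_go
    | some c =>
      let start : Int := if c == 'c' then 97 else 48
      let stop : Int := if c == 'c' then 122 else 57
      (PySem.List.pyRange start (stop + 1) 1).foldl
        (fun ans i => if i ≠ last then ans + go s (index + 1) i else ans) 0
termination_by (s.toList.length - index).toNat
decreasing_by
  have hlt := str_pyGet?_lt s index c h
  omega

-- ===== PORT B =====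
def go_alt (s : String) (index : Int) (last : Int) : Int :=
  (PySem.List.pyRange index (PySem.Str.len s) 1).foldl
    (fun ans i =>
      let cur : Char := (PySem.Str.pyGet? s i).getD ' '
      let lo : Int := if cur == 'c' then 97 else 48
      let hi : Int := if cur == 'c' then 122 else 57
      let sub : Int :=
        if i = index then (if lo ≤ last ∧ last ≤ hi then 1 else 0)
        else (if (((PySem.Str.pyGet? s (i - 1)).getD ' ') == 'c') = (cur == 'c') then 1 else 0)
      ans * (hi - lo + 1 - sub)) 1

-- ===== PRECONDITION & SPEC =====
-- Pre_go admits exactly the inputs on which Python A returns: |index| within the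
-- string's length (otherwise s[index] or a later s[i] raises IndexError).
def Pre_go (s : String) (index : Int) (last : Int) : Prop :=
  -(s.toList.length : Int) ≤ index ∧ index ≤ (s.toList.length : Int)
instance (s : String) (index : Int) (last : Int) : Decidable (Pre_go s index last) := by
  unfold Pre_go; infer_instance
def pvWitness_go : String × Int × Int := ("cc0", 0, 99)

def Spec_go (s : String) (index : Int) (last : Int) (out : Int) : Prop := out = go_alt s index last
instance (s : String) (index : Int) (last : Int) (out : Int) : Decidable (Spec_go s index last out) := by unfold Spec_go; infer_instance

-- ===== CLAIM (what is proved, stated in full; the proofs are below) =====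
def Claim_equal_go : Prop := ∀ (s : String) (index : Int) (last : Int), Dom_go s index last → Pre_go s index last → Spec_go s index last (go s index last)

-- ===== LEMMAS AND PROOFS =====

-- character at (possibly negative) index, as both ports read it
def chAt (s : String) (i : Int) : Char := (PySem.Str.pyGet? s i).getD ' '
-- lower/upper code of the alphabet at position i
def loOf (s : String) (i : Int) : Int := if chAt s i == 'c' then 97 else 48
def hiOf (s : String) (i : Int) : Int := if chAt s i == 'c' then 122 else 57
-- 1 iff last collides with the alphabet at position i
def inR (s : String) (i : Int) (last : Int) : Int :=
  if loOf s i ≤ last ∧ last ≤ hiOf s i then 1 else 0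
-- 1 iff positions i-1 and i share an alphabet
def st (s : String) (i : Int) : Int :=
  if (chAt s (i - 1) == 'c') = (chAt s i == 'c') then 1 else 0
-- product of the factors of positions index+1 .. len-1
def tailProd (s : String) (index : Int) : Int :=
  (PySem.List.pyRange (index + 1) (s.toList.length : Int) 1).foldl
    (fun a j => a * (hiOf s j - loOf s j + 1 - st s j)) 1

theorem foldl_mul_init (g : Int → Int) : ∀ (l : List Int) (a : Int),
    l.foldl (fun x j => x * g j) a = a * l.foldl (fun x j => x * g j) 1 := by
  intro l
  induction l with
  | nil => intro a; simp
  | cons h t ih =>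
    intro a
    simp only [List.foldl_cons]
    rw [ih (a * g h), ih (1 * g h)]
    ring

theorem pyGet?_some (s : String) (i : Int) (h1 : -(s.toList.length : Int) ≤ i)
    (h2 : i < (s.toList.length : Int)) : PySem.Str.pyGet? s i = some (chAt s i) := by
  have hne : PySem.List.pyGet? s.toList i ≠ none := by
    intro hc
    rw [PySem.List.pyGet?_eq_none_iff] at hc
    simp only [PySem.Raise.InRange] at hc
    omega
  rcases Option.ne_none_iff_exists'.mp hne with ⟨c, hc⟩
  have hs : PySem.Str.pyGet? s i = PySem.List.pyGet? s.toList i := by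
    simp [PySem.Str.pyGet?_eq, PySem.Chars.pyGet?_eq_listPyGet?]
  rw [chAt, hs, hc]; rfl

-- go_alt's one-step unfolding: first factor out, rest is tailProd
theorem alt_step (s : String) (index last : Int) (h : index < (s.toList.length : Int)) :
    go_alt s index last = (hiOf s index - loOf s index + 1 - inR s index last) * tailProd s index := by
  have hlen : PySem.Str.len s = (s.toList.length : Int) := by simp
  unfold go_alt
  rw [hlen, PySem.List.pyRange_one_cons h]
  simp only [List.foldl_cons]
  rw [PySem.List.foldl_congr_mem'
    (g := fun a j => a * (hiOf s j - loOf s j + 1 - st s j))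
    (h := by
      intro x hx acc
      have hxb := PySem.List.mem_pyRange_one.mp hx
      have hxne : ¬ x = index := by omega
      simp [hxne, chAt, st, loOf, hiOf])]
  rw [foldl_mul_init]
  unfold tailProd
  congr 1
  simp [chAt, loOf, hiOf, inR]

theorem alt_nil (s : String) (index last : Int) (h : (s.toList.length : Int) ≤ index) :
    go_alt s index last = 1 := by
  unfold go_alt
  have hlen : PySem.Str.len s = (s.toList.length : Int) := by simp
  rw [hlen, PySem.List.pyRange_one_eq_nil h]
  rfl

-- the tail product itself unfolds one factor
theorem tailProd_step (s : String) (index : Int) (h : index + 1 < (s.toList.length : Int)) :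
    tailProd s index = (hiOf s (index + 1) - loOf s (index + 1) + 1 - st s (index + 1)) * tailProd s (index + 1) := by
  unfold tailProd
  rw [PySem.List.pyRange_one_cons h]
  simp only [List.foldl_cons, one_mul]
  rw [foldl_mul_init]

-- for i in position index's alphabet, go_alt at index+1 collapses to tailProd at index
theorem alt_succ_const (s : String) (index i : Int)
    (hlo : loOf s index ≤ i) (hhi : i ≤ hiOf s index) :
    go_alt s (index + 1) i = tailProd s index := by
  rcases lt_or_ge (index + 1) (s.toList.length : Int) with hlt | hge
  · rw [alt_step s (index + 1) i hlt, tailProd_step s index hlt]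
    congr 1
    have : inR s (index + 1) i = st s (index + 1) := by
      unfold inR st loOf hiOf at *
      have harw : index + 1 - 1 = index := by omega
      rw [harw]
      by_cases h1 : chAt s index == 'c' <;> by_cases h2 : chAt s (index + 1) == 'c' <;>
        simp_all <;> omega
    omega
  · rw [alt_nil s (index + 1) i hge]
    unfold tailProd
    rw [PySem.List.pyRange_one_eq_nil hge]
    rfl

-- summing a constant v over a range, skipping `last`
theorem foldl_sum_ite (last v : Int) (f : Int → Int) :
    ∀ (l : List Int), (∀ i ∈ l, f i = v) → ∀ (acc : Int),
      l.foldl (fun a i => if i ≠ last then a + f i else a) acc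
        = acc + (l.countP (fun i => i != last) : Int) * v := by
  intro l
  induction l with
  | nil => intro _ acc; simp
  | cons h t ih =>
    intro hf acc
    have hh : f h = v := hf h (by simp)
    have ht : ∀ i ∈ t, f i = v := fun i hi => hf i (by simp [hi])
    simp only [List.foldl_cons, List.countP_cons]
    by_cases hne : h = last
    · subst hne
      simpa using ih ht acc
    · have hbne : (h != last) = true := by simp [hne]
      rw [if_pos hne, ih ht (acc + f h), hh]
      simp only [hbne]
      push_cast
      ring

theorem countP_range_ne (a b last : Int) (hab : a ≤ b) :
    ((PySem.List.pyRange a b 1).countP (fun i => i != last) : Int)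
      = (b - a) - (if a ≤ last ∧ last < b then 1 else 0) := by
  have hnd := PySem.List.nodup_pyRange_one (a := a) (b := b)
  have hlen : (PySem.List.pyRange a b 1).length = (b - a).toNat := by
    simp [PySem.List.length_pyRange_one]
  have hsplit : (PySem.List.pyRange a b 1).length
      = (PySem.List.pyRange a b 1).countP (fun i => i != last)
        + (PySem.List.pyRange a b 1).count last := by
    rw [List.count, List.length_eq_countP_add_countP (fun i => i != last)]
    congr 1
    apply List.countP_congr
    intro x _
    simp [bne]
  have hcnt : (PySem.List.pyRange a b 1).count last
      = if a ≤ last ∧ last < b then 1 else 0 := by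
    by_cases hm : last ∈ PySem.List.pyRange a b 1
    · rw [if_pos (PySem.List.mem_pyRange_one.mp hm)]
      exact List.count_eq_one_of_mem hnd hm
    · rw [if_neg (fun hc => hm (PySem.List.mem_pyRange_one.mpr hc))]
      exact List.count_eq_zero_of_not_mem hm
  rw [hcnt] at hsplit
  rw [hlen] at hsplit
  split_ifs at hsplit ⊢ with hc
  · omega
  · omega

theorem go_eq_alt (s : String) : ∀ (k : Nat) (index last : Int),
    ((s.toList.length : Int) - index).toNat = k →
    -(s.toList.length : Int) ≤ index → index ≤ (s.toList.length : Int) →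
    go s index last = go_alt s index last := by
  intro k
  induction k with
  | zero =>
    intro index last hk h1 h2
    have hix : index = (s.toList.length : Int) := by omega
    rw [alt_nil s index last (by omega)]
    unfold go
    have : (PySem.Str.len s == index) = true := by simp [hix]
    rw [if_pos this]
  | succ k ih =>
    intro index last hk h1 h2
    have hlt : index < (s.toList.length : Int) := by omega
    unfold go
    have hlen2 : (s.toList.length : Int) = (s.length : Int) := by simp
    have hne : ¬ (PySem.Str.len s == index) = true := by simp; omega
    rw [if_neg hne, pyGet?_some s index h1 hlt]
    show (PySem.List.pyRange (loOf s index) (hiOf s index + 1) 1).foldl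
        (fun ans i => if i ≠ last then ans + go s (index + 1) i else ans) 0
      = go_alt s index last
    have hconst : ∀ i ∈ PySem.List.pyRange (loOf s index) (hiOf s index + 1) 1,
        go s (index + 1) i = tailProd s index := by
      intro i hi
      have hb := PySem.List.mem_pyRange_one.mp hi
      rw [ih (index + 1) i (by omega) (by omega) (by omega)]
      exact alt_succ_const s index i hb.1 (by omega)
    rw [foldl_sum_ite last (tailProd s index) _ _ hconst 0]
    rw [countP_range_ne (loOf s index) (hiOf s index + 1) last
      (by unfold loOf hiOf; split_ifs <;> omega)]
    rw [alt_step s index last hlt]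
    have : (hiOf s index + 1 - loOf s index) - (if loOf s index ≤ last ∧ last < hiOf s index + 1 then 1 else 0)
        = hiOf s index - loOf s index + 1 - inR s index last := by
      unfold inR
      split_ifs with hA hB hB <;> omega
    rw [this]
    ring

-- ===== VERDICT (by name: the statement is the Claim_ definition above) =====
theorem go_spec : Claim_equal_go := by
  intro s index last _ hpre
  unfold Spec_go
  exact go_eq_alt s (((s.toList.length : Int) - index).toNat) index last rfl hpre.1 hpre.2
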